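-- pv_equiv track=rewrite | github.com/jordicor/Atagia | src/atagia/memory/text_chunker.py | _remove_overlapping_separators
-- ===== SOURCE A (Python) =====
-- def _remove_overlapping_separators(positions: list[int]) -> list[int]:
--     if not positions:
--         return [0]
--     deduped: list[int] = [positions[0]]
--     for position in positions[1:]:
--         if position <= deduped[-1]:
--             continue
--         deduped.append(position)
--     return deduped
-- ===== SOURCE B (Python) =====
-- def _remove_overlapping_separators(positions: list[int]) -> list[int]:
--     if not positions:
--         return [0]
--     # pass 1: prefix running-maximum table (running[i] = max of positions[:i+1])
--     running = []
--     m = positions[0]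
--     for p in positions:
--         m = m if m >= p else p
--         running.append(m)
--     # pass 2: keep each later position iff it beats the running max of all earlier ones
--     return [positions[0]] + [p for p, prev in zip(positions[1:], running) if p > prev]
-- ===== Notes on version B (the rewrite author's own statement) =====
-- stated objective: alternative
-- what changed: Replaced the single incremental scan comparing against the last appended element by a two-pass build-a-table-then-filter shape: first materialize a prefix running-maximum table, then filter positions[1:] zipped against it.
import Mathlib
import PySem

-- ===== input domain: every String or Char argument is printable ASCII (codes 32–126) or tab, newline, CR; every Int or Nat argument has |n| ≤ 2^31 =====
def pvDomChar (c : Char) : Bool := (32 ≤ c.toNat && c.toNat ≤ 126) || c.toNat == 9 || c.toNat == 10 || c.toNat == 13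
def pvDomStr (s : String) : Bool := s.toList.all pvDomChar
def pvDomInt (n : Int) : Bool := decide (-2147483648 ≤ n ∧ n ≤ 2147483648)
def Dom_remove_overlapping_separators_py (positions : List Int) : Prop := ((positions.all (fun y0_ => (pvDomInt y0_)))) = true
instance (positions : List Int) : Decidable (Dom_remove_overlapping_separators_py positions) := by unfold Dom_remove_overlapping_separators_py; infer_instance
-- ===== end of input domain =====

-- B replaces A's incremental last-element scan by a two-pass shape (prefix running-max table, then zip-filter); alternative decomposition, same cost.


-- ===== PORT A =====
-- loop over positions[1:] carrying the growing 'deduped' list; deduped is never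
-- empty, so 'deduped[-1]' is exactly its last element (getLastD 0 is exact here)
def goA_remove (deduped : List Int) : List Int → List Int
  | [] => deduped
  | p :: ps =>
    if p ≤ deduped.getLastD 0 then goA_remove deduped ps
    else goA_remove (deduped ++ [p]) ps

def remove_overlapping_separators_py (positions : List Int) : List Int :=
  match positions with
  | [] => [0]
  | p0 :: rest => goA_remove [p0] rest

-- ===== PORT B =====
-- pass 1 of Source B: the prefix running-maximum table (m initialized to positions[0])
def runMax_remove (m : Int) : List Int → List Int
  | [] => []
  | p :: ps =>
    let m' := if m ≥ p then m else p
    m' :: runMax_remove m' ps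

def remove_overlapping_separators_py_alt (positions : List Int) : List Int :=
  match positions with
  | [] => [0]
  | p0 :: rest =>
    p0 :: (((rest.zip (runMax_remove p0 positions)).filter (fun x => x.2 < x.1)).map Prod.fst)

-- ===== PRECONDITION & SPEC =====
def Spec_remove_overlapping_separators_py (positions : List Int) (out : List Int) : Prop := out = remove_overlapping_separators_py_alt positions
instance (positions : List Int) (out : List Int) : Decidable (Spec_remove_overlapping_separators_py positions out) := by unfold Spec_remove_overlapping_separators_py; infer_instance

-- ===== CLAIM (what is proved, stated in full; the proofs are below) =====
def Claim_equal_remove_overlapping_separators_py : Prop := ∀ (positions : List Int), Dom_remove_overlapping_separators_py positions → Spec_remove_overlapping_separators_py positions (remove_overlapping_separators_py positions)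

-- ===== LEMMAS AND PROOFS =====

-- abstract selector: elements strictly above the running max of everything before them
def sel_remove (m : Int) : List Int → List Int
  | [] => []
  | q :: qs => if m < q then q :: sel_remove q qs else sel_remove m qs

theorem goA_eq_sel (ps : List Int) : ∀ (acc : List Int),
    goA_remove acc ps = acc ++ sel_remove (acc.getLastD 0) ps := by
  induction ps with
  | nil => intro acc; simp [goA_remove, sel_remove]
  | cons p ps ih =>
    intro acc
    by_cases h : p ≤ acc.getLastD 0
    · simp only [List.getLastD_eq_getLast?] at h
      simp [goA_remove, sel_remove, h, not_lt.mpr h, ih]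
    · have h' : acc.getLastD 0 < p := not_le.mp h
      simp only [List.getLastD_eq_getLast?] at h h'
      simp [goA_remove, sel_remove, h, h', ih (acc ++ [p])]

theorem zip_runMax_eq_sel (ps : List Int) : ∀ (m : Int),
    (((ps.zip (m :: runMax_remove m ps)).filter (fun x => x.2 < x.1)).map Prod.fst)
      = sel_remove m ps := by
  induction ps with
  | nil => intro m; simp [sel_remove]
  | cons q qs ih =>
    intro m
    have hmax : (if m ≥ q then m else q) = max m q := by
      simp [max_def]; omega
    by_cases h : m < q
    · have hq : max m q = q := by omega
      simp only [runMax_remove, sel_remove, hmax, hq, if_pos h, List.zip, List.zipWith_cons_cons,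
        List.filter_cons]
      simp [h]
      simpa [List.zip] using ih q
    · have hm : max m q = m := by omega
      simp only [runMax_remove, sel_remove, hmax, hm, if_neg h, List.zip, List.zipWith_cons_cons,
        List.filter_cons]
      simp [h]
      simpa [List.zip] using ih m

-- ===== VERDICT (by name: the statement is the Claim_ definition above) =====
theorem remove_overlapping_separators_py_spec : Claim_equal_remove_overlapping_separators_py := by
  intro positions _
  unfold Spec_remove_overlapping_separators_py
  match positions with
  | [] => rfl
  | p0 :: rest =>
    have hrun : runMax_remove p0 (p0 :: rest) = p0 :: runMax_remove p0 rest := by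
      simp [runMax_remove]
    simp only [remove_overlapping_separators_py, remove_overlapping_separators_py_alt,
      hrun, goA_eq_sel rest [p0], zip_runMax_eq_sel]
    simp
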